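-- pv_equiv track=rewrite | github.com/ajswis/PacVis | sniffer.py | _get_authoratative_domain
-- ===== SOURCE A (Python) =====
-- NONTRUNCATED_DOMAINS = (
--     # Empty, for now.
-- )
--
-- def _get_authoratative_domain(domain):
--     t, s, l = 0, 0, 0 # Third last, second last, and last dots in the string
--     for i,c in enumerate(domain):
--         if c == '.':
--             t, s, l = s, l, i
--     if domain[s+1:] in NONTRUNCATED_DOMAINS:
--         s = t # Need to differentiate nodes with common authorative domains
--               # by not truncating the address.
--     if domain[s] == '.':
--         s += 1 # Remove leading '.' if one exists.
--     return domain[s:]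
-- ===== SOURCE B (Python) =====
-- def _get_authoratative_domain(domain):
--     last = domain.rfind('.')
--     second = domain.rfind('.', 0, last)
--     if second == -1:
--         return domain[1:] if domain.startswith('.') else domain
--     return domain[second + 1:]
-- ===== Notes on version B (the rewrite author's own statement) =====
-- stated objective: simpler
-- what changed: Replaced the forward enumerate loop rolling three dot indices (and the dead NONTRUNCATED_DOMAINS membership test) by two C-level str.rfind calls locating the last and second-to-last dots from the end, with a direct startswith check stripping a leading dot in the fewer-than-two-dots case.
import Mathlib
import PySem

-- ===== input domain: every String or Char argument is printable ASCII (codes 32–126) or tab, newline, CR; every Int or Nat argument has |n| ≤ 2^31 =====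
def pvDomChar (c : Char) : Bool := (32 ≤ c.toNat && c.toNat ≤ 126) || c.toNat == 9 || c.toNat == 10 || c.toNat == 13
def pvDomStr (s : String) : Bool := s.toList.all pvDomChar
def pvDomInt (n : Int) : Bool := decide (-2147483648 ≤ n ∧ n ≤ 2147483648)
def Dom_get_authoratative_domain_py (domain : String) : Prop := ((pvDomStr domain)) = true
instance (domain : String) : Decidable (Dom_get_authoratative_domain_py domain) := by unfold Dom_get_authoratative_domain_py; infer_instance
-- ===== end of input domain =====

-- B replaces A's forward three-index rolling loop (and its dead NONTRUNCATED_DOMAINS branch)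
-- by two rfind calls from the end plus a startswith('.') strip; objective: simpler.


-- ===== PORT A =====
def nontruncatedDomains : List String := []

def get_authoratative_domain_py (domain : String) : String :=
  let st : Int × Int × Int :=
    (PySem.List.enumerate domain.toList).foldl
      (fun tsl ic => if ic.2 = '.' then (tsl.2.1, tsl.2.2, ic.1) else tsl)
      (0, 0, 0)
  let s := if nontruncatedDomains.contains (PySem.Str.slice domain (some (st.2.1 + 1)) none)
           then st.1 else st.2.1
  match PySem.Str.pyGet? domain s with
  | some c => PySem.Str.slice domain (some (if c = '.' then s + 1 else s)) none
  | none => ""   -- Python raises IndexError here (only reachable for domain = ""); excluded by Pre_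

-- ===== PORT B =====
def get_authoratative_domain_py_alt (domain : String) : String :=
  let last := PySem.Str.rfind domain "."
  let second := PySem.Str.rfindFrom domain "." 0 (some last)
  if second = -1 then
    if PySem.Str.startswith domain "." then PySem.Str.slice domain (some 1) none else domain
  else
    PySem.Str.slice domain (some (second + 1)) none

-- ===== PRECONDITION & SPEC =====
-- Pre_ excludes only the empty string, on which A raises IndexError (domain[s] with s = 0).
def Pre_get_authoratative_domain_py (domain : String) : Prop := domain ≠ ""
instance (domain : String) : Decidable (Pre_get_authoratative_domain_py domain) := by unfold Pre_get_authoratative_domain_py; infer_instance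
def pvWitness_get_authoratative_domain_py : String := "www.example.com"

def Spec_get_authoratative_domain_py (domain : String) (out : String) : Prop := out = get_authoratative_domain_py_alt domain
instance (domain : String) (out : String) : Decidable (Spec_get_authoratative_domain_py domain out) := by unfold Spec_get_authoratative_domain_py; infer_instance

-- ===== CLAIM (what is proved, stated in full; the proofs are below) =====
def Claim_equal_get_authoratative_domain_py : Prop := ∀ (domain : String), Dom_get_authoratative_domain_py domain → Pre_get_authoratative_domain_py domain → Spec_get_authoratative_domain_py domain (get_authoratative_domain_py domain)

-- ===== LEMMAS AND PROOFS =====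

/-- Index (Python-style) of the last '.' among indices `≤ n` of `l`, or `-1`. -/
def lastDotUpto (l : List Char) : Nat → Int
  | 0 => if l[0]? = some '.' then 0 else -1
  | n+1 => if l[n+1]? = some '.' then ((n : Int) + 1) else lastDotUpto l n

/-- Index of the last '.' of `l`, or `-1`. -/
def lastDot (l : List Char) : Int := lastDotUpto l l.length

/-- Index of the second-to-last '.' of `l`, or `-1`. -/
def secondDot (l : List Char) : Int :=
  if lastDot l <= 0 then -1 else lastDotUpto l ((lastDot l).toNat - 1)

theorem lastDotUpto_zero (l : List Char) :
    lastDotUpto l 0 = if l[0]? = some '.' then 0 else -1 := rfl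

theorem lastDotUpto_succ (l : List Char) (n : Nat) :
    lastDotUpto l (n+1) = if l[n+1]? = some '.' then ((n : Int) + 1) else lastDotUpto l n := rfl

theorem singleton_isPrefixOf (c : Char) (xs : List Char) :
    List.isPrefixOf [c] xs = (xs[0]? == some c) := by
  cases xs <;> simp [List.isPrefixOf, eq_comm]

theorem singleton_prefix (c : Char) (xs : List Char) :
    [c] <+: xs ↔ xs[0]? = some c := by
  rw [← List.isPrefixOf_iff_prefix, singleton_isPrefixOf, beq_iff_eq]

theorem rfind_go_eq (l : List Char) (n : Nat) :
    PySem.Chars.rfind.go l ['.'] n = lastDotUpto l n := by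
  induction n with
  | zero => simp [PySem.Chars.rfind.go, lastDotUpto_zero, singleton_isPrefixOf]
  | succ m ih =>
      simp [PySem.Chars.rfind.go, lastDotUpto_succ, singleton_isPrefixOf, ih]

theorem rfind_eq_lastDot (l : List Char) : PySem.Chars.rfind l ['.'] = lastDot l := by
  simp [PySem.Chars.rfind, rfind_go_eq, lastDot]

theorem neg_one_le_lastDotUpto (l : List Char) (n : Nat) : -1 <= lastDotUpto l n := by
  induction n with
  | zero => rw [lastDotUpto_zero]; split <;> omega
  | succ m ih =>
      rw [lastDotUpto_succ]
      split
      · omega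
      · exact ih

theorem lastDotUpto_le (l : List Char) (n : Nat) : lastDotUpto l n <= (n : Int) := by
  induction n with
  | zero => rw [lastDotUpto_zero]; split <;> omega
  | succ m ih =>
      rw [lastDotUpto_succ]
      split
      · push_cast; omega
      · exact le_trans ih (by push_cast; omega)

theorem lastDotUpto_isDot (l : List Char) (n : Nat) (h : 0 <= lastDotUpto l n) :
    l[(lastDotUpto l n).toNat]? = some '.' := by
  induction n with
  | zero =>
      by_cases hd : l[0]? = some '.'
      · simp [lastDotUpto_zero, hd]
      · rw [lastDotUpto_zero, if_neg hd] at h; omega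
  | succ m ih =>
      by_cases hd : l[m+1]? = some '.'
      · simp [lastDotUpto_succ, hd]
      · rw [lastDotUpto_succ, if_neg hd] at h ⊢; exact ih h

theorem lastDotUpto_eq_neg_one_iff (l : List Char) (n : Nat) :
    lastDotUpto l n = -1 ↔ ∀ j ≤ n, l[j]? ≠ some '.' := by
  induction n with
  | zero =>
      rw [lastDotUpto_zero]; split
      · next hd =>
          constructor
          · intro h; omega
          · intro h; exact absurd hd (h 0 le_rfl)
      · next hd =>
          constructor
          · intro _ j hj
            have : j = 0 := Nat.le_zero.mp hj
            subst this; exact hd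
          · intro _; rfl
  | succ m ih =>
      rw [lastDotUpto_succ]; split
      · next hd =>
          constructor
          · intro h; omega
          · intro h; exact absurd hd (h (m+1) le_rfl)
      · next hd =>
          rw [ih]
          constructor
          · intro h j hj
            rcases Nat.lt_or_ge j (m+1) with hl | hl
            · exact h j (by omega)
            · have : j = m + 1 := by omega
              subst this; exact hd
          · intro h j hj; exact h j (by omega)

theorem lastDotUpto_congr (l₁ l₂ : List Char) (n : Nat)
    (h : ∀ j ≤ n, l₁[j]? = l₂[j]?) : lastDotUpto l₁ n = lastDotUpto l₂ n := by
  induction n with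
  | zero => rw [lastDotUpto_zero, lastDotUpto_zero, h 0 (by omega)]
  | succ m ih =>
      rw [lastDotUpto_succ, lastDotUpto_succ, h (m+1) le_rfl,
        ih (fun j hj => h j (by omega))]

theorem lastDotUpto_top_none (l : List Char) (m : Nat) (h : l[m+1]? = none) :
    lastDotUpto l (m+1) = lastDotUpto l m := by
  rw [lastDotUpto_succ, h]; simp

theorem neg_one_le_secondDot (l : List Char) : -1 <= secondDot l := by
  unfold secondDot; split
  · omega
  · exact neg_one_le_lastDotUpto _ _

theorem lastDot_append (l : List Char) (c : Char) :
    lastDot (l ++ [c]) = if c = '.' then (l.length : Int) else lastDot l := by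
  unfold lastDot
  have hlen : (l ++ [c]).length = l.length + 1 := by simp
  rw [hlen]
  cases hn : l.length with
  | zero =>
      have hl : l = [] := List.length_eq_zero_iff.mp hn
      subst hl
      rw [lastDotUpto_succ, lastDotUpto_zero, lastDotUpto_zero]
      simp
  | succ m =>
      rw [lastDotUpto_succ]
      have h1 : (l ++ [c])[m+1+1]? = none := by
        apply List.getElem?_eq_none; simp [hn]
      rw [h1]
      simp only [reduceCtorEq, if_false]
      rw [lastDotUpto_succ]
      have h2 : (l ++ [c])[m+1]? = some c := by
        rw [List.getElem?_append_right (by omega), hn]; simp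
      rw [h2]
      have h3 : lastDotUpto (l ++ [c]) m = lastDotUpto l m := by
        apply lastDotUpto_congr
        intro j hj
        exact List.getElem?_append_left (by omega)
      have h4 : lastDotUpto l (m+1) = lastDotUpto l m := by
        apply lastDotUpto_top_none
        apply List.getElem?_eq_none; omega
      rw [h3, h4]
      split <;> simp_all

theorem secondDot_append (l : List Char) (c : Char) :
    secondDot (l ++ [c]) = if c = '.' then lastDot l else secondDot l := by
  unfold secondDot
  rw [lastDot_append]
  by_cases hc : c = '.'
  · simp only [if_pos hc]
    cases hn : l.length with
    | zero =>
        have hl : l = [] := List.length_eq_zero_iff.mp hn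
        subst hl; simp [lastDot, lastDotUpto_zero]
    | succ m =>
        rw [if_neg (by push_cast; omega)]
        have ht : (((m+1 : Nat) : Int)).toNat - 1 = m := by simp
        rw [ht]
        have h3 : lastDotUpto (l ++ [c]) m = lastDotUpto l m := by
          apply lastDotUpto_congr
          intro j hj
          exact List.getElem?_append_left (by omega)
        have h4 : lastDot l = lastDotUpto l m := by
          unfold lastDot; rw [hn]
          apply lastDotUpto_top_none
          apply List.getElem?_eq_none; omega
        rw [h3, h4]
  · simp only [if_neg hc]
    by_cases hJ : lastDot l <= 0
    · rw [if_pos hJ, if_pos hJ]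
    · rw [if_neg hJ, if_neg hJ]
      apply lastDotUpto_congr
      intro j hj
      have h1 : lastDot l <= (l.length : Int) := lastDotUpto_le l l.length
      exact List.getElem?_append_left (by omega)

def pvStep (tsl : Int × Int × Int) (ic : Int × Char) : Int × Int × Int :=
  if ic.2 = '.' then (tsl.2.1, tsl.2.2, ic.1) else tsl

theorem fold_snd_eq (l : List Char) :
    ((PySem.List.enumerate l).foldl pvStep (0, 0, 0)).2 =
      (if secondDot l = -1 then 0 else secondDot l,
       if lastDot l = -1 then 0 else lastDot l) := by
  induction l using List.reverseRecOn with
  | nil => decide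
  | append_singleton l c ih =>
      rw [PySem.List.enumerate_append, List.foldl_append]
      have he : PySem.List.enumerate [c] (0 + (l.length : Int)) = [((l.length : Int), c)] := by
        rw [PySem.List.enumerate_cons]; simp [PySem.List.enumerate]
      rw [he]
      simp only [List.foldl_cons, List.foldl_nil]
      rw [lastDot_append, secondDot_append]
      by_cases hc : c = '.'
      · have hstep : ∀ (st : Int × Int × Int),
            (pvStep st ((l.length : Int), c)).2 = (st.2.2, (l.length : Int)) := by
          intro st; simp [pvStep, hc]
        rw [hstep, if_pos hc, if_pos hc]
        have h2 : ((PySem.List.enumerate l).foldl pvStep (0, 0, 0)).2.2 =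
            if lastDot l = -1 then 0 else lastDot l := by rw [ih]
        rw [h2]
        have : ¬ ((l.length : Int) = -1) := by omega
        rw [if_neg this]
      · have hstep : ∀ (st : Int × Int × Int),
            pvStep st ((l.length : Int), c) = st := by
          intro st; simp [pvStep, hc]
        rw [hstep, ih, if_neg hc, if_neg hc]

theorem rfindFrom_eq_secondDot (l : List Char) (hl : l ≠ []) :
    PySem.Chars.rfindFrom l ['.'] 0 (some (lastDot l)) = secondDot l := by
  have hn : 1 ≤ l.length := by
    cases l with
    | nil => exact absurd rfl hl
    | cons a t => simp
  have hJle : lastDot l <= (l.length : Int) := lastDotUpto_le l l.length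
  have hJge : -1 <= lastDot l := neg_one_le_lastDotUpto l l.length
  by_cases hJ : lastDot l = -1
  · -- no dot at all
    have hnodot : ∀ j : Nat, l[j]? ≠ some '.' := by
      intro j
      by_cases hj : j ≤ l.length
      · exact (lastDotUpto_eq_neg_one_iff l l.length).mp hJ j hj
      · rw [List.getElem?_eq_none (by omega)]; simp
    have hsd : secondDot l = -1 := by unfold secondDot; rw [if_pos (by omega)]
    rw [hsd, hJ]
    simp only [PySem.Chars.rfindFrom]
    have h1 : ¬ ((l.length : Int) < -1) := by omega
    have h2 : (-1 : Int) < 0 := by omega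
    have h3 : ¬ ((-1 : Int) + (l.length : Int) < 0) := by omega
    have h4 : ¬ ((0 : Int) < 0) := by omega
    simp only [if_neg h1, if_pos h2, if_neg h3, if_neg h4]
    have hr : PySem.Chars.rfind (List.drop (0 : Int).toNat
        (List.take ((-1 : Int) + (l.length : Int)).toNat l)) ['.'] = -1 := by
      rw [rfind_eq_lastDot]
      rw [show lastDot (List.drop (0 : Int).toNat
          (List.take ((-1 : Int) + (l.length : Int)).toNat l)) =
        lastDotUpto (List.drop (0 : Int).toNat
          (List.take ((-1 : Int) + (l.length : Int)).toNat l))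
          (List.drop (0 : Int).toNat
            (List.take ((-1 : Int) + (l.length : Int)).toNat l)).length from rfl]
      rw [lastDotUpto_eq_neg_one_iff]
      intro j hj
      rw [List.getElem?_drop, List.getElem?_take]
      split
      · exact hnodot _
      · simp
    rw [hr]
    simp
  · -- lastDot l = J ≥ 0
    have hJ0 : 0 <= lastDot l := by omega
    have hdotJ : l[(lastDot l).toNat]? = some '.' := lastDotUpto_isDot l l.length hJ0
    have hJlt : (lastDot l).toNat < l.length := by
      by_contra h
      rw [List.getElem?_eq_none (by omega)] at hdotJ
      simp at hdotJ
    simp only [PySem.Chars.rfindFrom]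
    have h1 : ¬ ((l.length : Int) < lastDot l) := by omega
    have h2 : ¬ (lastDot l < 0) := by omega
    have h4 : ¬ ((0 : Int) < 0) := by omega
    simp only [if_neg h1, if_neg h2, if_neg h4]
    have hr : PySem.Chars.rfind (List.drop (0 : Int).toNat
        (List.take (lastDot l).toNat l)) ['.'] = secondDot l := by
      rw [rfind_eq_lastDot]
      simp only [Int.toNat_zero, List.drop_zero]
      rw [show lastDot (List.take (lastDot l).toNat l) =
        lastDotUpto (List.take (lastDot l).toNat l)
          (List.take (lastDot l).toNat l).length from rfl]
      have hlen : (List.take (lastDot l).toNat l).length = (lastDot l).toNat := by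
        simp; omega
      rw [hlen]
      cases hJn : (lastDot l).toNat with
      | zero =>
          have hsd : secondDot l = -1 := by unfold secondDot; rw [if_pos (by omega)]
          rw [hsd]
          simp [lastDotUpto_zero]
      | succ m =>
          have h1' : lastDotUpto (List.take (m+1) l) (m+1) =
              lastDotUpto (List.take (m+1) l) m := by
            apply lastDotUpto_top_none
            rw [List.getElem?_take]
            rw [if_neg (by omega)]
          have h2' : lastDotUpto (List.take (m+1) l) m = lastDotUpto l m := by
            apply lastDotUpto_congr
            intro j hj
            rw [List.getElem?_take, if_pos (by omega)]
          have hsd : secondDot l = lastDotUpto l m := by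
            unfold secondDot
            rw [if_neg (by omega), hJn]
            simp
          rw [h1', h2', hsd]
    simp only [Int.toNat_zero, List.drop_zero] at hr
    simp only [Int.toNat_zero, List.drop_zero]
    rw [hr]
    have hge : -1 <= secondDot l := neg_one_le_secondDot l
    by_cases hs : secondDot l = -1
    · rw [hs]; simp
    · rw [if_neg hs]; omega

theorem slice_zero_eq (s : String) : PySem.Str.slice s (some 0) none = s := by
  rw [← String.toList_inj, PySem.Str.toList_slice, PySem.Chars.slice_eq_listSlice]
  simp [PySem.List.slice_from]

theorem toList_ne_nil (s : String) (h : s ≠ "") : s.toList ≠ [] := by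
  intro hc
  apply h
  rw [← String.toList_inj, hc]
  rfl

-- ===== VERDICT (by name: the statement is the Claim_ definition above) =====
theorem get_authoratative_domain_py_spec : Claim_equal_get_authoratative_domain_py := by
  unfold Claim_equal_get_authoratative_domain_py
  intro domain _ hpre
  unfold Spec_get_authoratative_domain_py
  unfold get_authoratative_domain_py get_authoratative_domain_py_alt
  have hl : domain.toList ≠ [] := toList_ne_nil domain hpre
  have hn : 1 ≤ domain.toList.length := by
    cases h : domain.toList with
    | nil => exact absurd h hl
    | cons a t => simp
  simp only [nontruncatedDomains, List.contains_nil, Bool.false_eq_true, if_false]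
  have hfold : ((PySem.List.enumerate domain.toList).foldl
      (fun tsl ic => if ic.2 = '.' then (tsl.2.1, tsl.2.2, ic.1) else tsl)
      ((0 : Int), (0 : Int), (0 : Int))).2 =
      (if secondDot domain.toList = -1 then 0 else secondDot domain.toList,
       if lastDot domain.toList = -1 then 0 else lastDot domain.toList) := by
    exact fold_snd_eq domain.toList
  have hrfind : PySem.Str.rfind domain "." = lastDot domain.toList := by
    rw [PySem.Str.rfind_eq]
    exact rfind_eq_lastDot domain.toList
  have hrfrom : PySem.Str.rfindFrom domain "." 0 (some (lastDot domain.toList)) =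
      secondDot domain.toList := by
    rw [PySem.Str.rfindFrom_eq]
    exact rfindFrom_eq_secondDot domain.toList hl
  have hs1 : ((PySem.List.enumerate domain.toList).foldl
      (fun tsl ic => if ic.2 = '.' then (tsl.2.1, tsl.2.2, ic.1) else tsl)
      ((0 : Int), (0 : Int), (0 : Int))).2.1 =
      if secondDot domain.toList = -1 then 0 else secondDot domain.toList := by
    rw [hfold]
  rw [hs1, hrfind, hrfrom]
  by_cases hsd : secondDot domain.toList = -1
  · rw [if_pos hsd, if_pos hsd]
    have hg : PySem.Str.pyGet? domain (0 : Int) = domain.toList[0]? := by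
      have : ((0 : Nat) : Int) = (0 : Int) := rfl
      rw [← this, PySem.Str.pyGet?_natCast]
    rw [hg]
    cases hc : domain.toList[0]? with
    | none =>
        rw [List.getElem?_eq_none_iff] at hc
        omega
    | some c0 =>
        by_cases hdot : c0 = '.'
        · subst hdot
          have hsw : PySem.Str.startswith domain "." = true := by
            have : (".").toList = ['.'] := rfl
            rw [PySem.Str.startswith_eq, this, PySem.Chars.startswith_iff,
              singleton_prefix]
            exact hc
          rw [hsw]
          simp
        · have hsw : PySem.Str.startswith domain "." = false := by
            have h1 : (".").toList = ['.'] := rfl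
            rw [PySem.Str.startswith_eq, h1]
            rw [Bool.eq_false_iff]
            intro hcon
            rw [PySem.Chars.startswith_iff, singleton_prefix] at hcon
            rw [hc] at hcon
            exact hdot (Option.some.injEq .. ▸ hcon)
          rw [hsw]
          simp only [Bool.false_eq_true, if_false, if_neg hdot]
          exact slice_zero_eq domain
  · rw [if_neg hsd, if_neg hsd]
    have hge : -1 <= secondDot domain.toList := neg_one_le_secondDot domain.toList
    have hk0 : 0 <= secondDot domain.toList := by omega
    have hdotk : domain.toList[(secondDot domain.toList).toNat]? = some '.' := by
      unfold secondDot at hsd ⊢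
      by_cases hJ : lastDot domain.toList <= 0
      · rw [if_pos hJ] at hsd; exact absurd rfl hsd
      · rw [if_neg hJ] at hsd ⊢
        apply lastDotUpto_isDot
        have := neg_one_le_lastDotUpto domain.toList ((lastDot domain.toList).toNat - 1)
        unfold secondDot at hk0
        rw [if_neg hJ] at hk0
        exact hk0
    have hg : PySem.Str.pyGet? domain (secondDot domain.toList) =
        some '.' := by
      have hcast : secondDot domain.toList = (((secondDot domain.toList).toNat : Nat) : Int) := by
        omega
      rw [hcast, PySem.Str.pyGet?_natCast]
      exact hdotk
    rw [hg]
    simp
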